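-- pv_equiv track=rewrite | github.com/onlyxool/x2caffe | pto2caffe/util.py | trim_one
-- ===== SOURCE A (Python) =====
-- def trim_one(scale_shape):
--     if len(scale_shape) <= 1 or scale_shape is None:
--         return scale_shape
--
--     # Remove 1 from head
--     while True:
--         if len(scale_shape) > 1 and scale_shape[0] == 1:
--             scale_shape.remove(1)
--         else:
--             break
--
--     # Remove 1 from tail
--     while True:
--         if len(scale_shape) > 1 and scale_shape[-1] == 1:
--             scale_shape.pop()
--         else:
--             break
--
--     return scale_shape
-- ===== SOURCE B (Python) =====
-- def trim_one(scale_shape):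
--     if len(scale_shape) <= 1 or scale_shape is None:
--         return scale_shape
--     start = 0
--     while start < len(scale_shape) - 1 and scale_shape[start] == 1:
--         start += 1
--     end = len(scale_shape)
--     while end > start + 1 and scale_shape[end - 1] == 1:
--         end -= 1
--     scale_shape[:] = scale_shape[start:end]
--     return scale_shape
-- ===== Notes on version B (the rewrite author's own statement) =====
-- stated objective: simpler
-- what changed: Replaces A's two repeated-deletion loops (remove(1)/pop(), each shifting or truncating the list) by one boundary-finding pass computing a start and end index followed by a single slice assignment.
import Mathlib
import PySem

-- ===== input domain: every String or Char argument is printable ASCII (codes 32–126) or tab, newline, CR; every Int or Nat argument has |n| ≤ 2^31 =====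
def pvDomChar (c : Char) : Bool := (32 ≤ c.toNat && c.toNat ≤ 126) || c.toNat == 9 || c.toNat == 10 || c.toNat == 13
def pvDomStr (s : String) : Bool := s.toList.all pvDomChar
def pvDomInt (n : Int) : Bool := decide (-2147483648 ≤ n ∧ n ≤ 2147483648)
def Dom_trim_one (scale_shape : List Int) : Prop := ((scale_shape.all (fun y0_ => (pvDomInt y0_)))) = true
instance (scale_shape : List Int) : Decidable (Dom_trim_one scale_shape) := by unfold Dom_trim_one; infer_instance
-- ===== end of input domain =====

-- B replaces A's repeated remove/pop deletion loops by one boundary-finding pass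
-- (a start and an end index) plus a single slice (simpler; both Pythons mutate the
-- argument in place the same way; the equivalence proved here is about the return value).

-- ===== PORT A =====
-- while True: if len(l) > 1 and l[0] == 1: l.remove(1) else: break
-- (under the guard l[0] == 1, remove(1) deletes the first occurrence of 1, which is
--  exactly index 0, so the list after remove(1) is l.tail)
def pvTrimHeadA (l : List Int) : List Int :=
  if 1 < l.length ∧ PySem.List.pyGet? l 0 = some 1 then
    pvTrimHeadA l.tail
  else l
termination_by l.length
decreasing_by
  rename_i h
  cases l with
  | nil => simp at h
  | cons a t => simp

-- while True: if len(l) > 1 and l[-1] == 1: l.pop() else: break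
def pvTrimTailA (l : List Int) : List Int :=
  if 1 < l.length ∧ PySem.List.pyGet? l (-1) = some 1 then
    pvTrimTailA l.dropLast
  else l
termination_by l.length
decreasing_by
  rename_i h
  simp only [List.length_dropLast]
  omega

def trim_one (scale_shape : List Int) : List Int :=
  if scale_shape.length ≤ 1 then scale_shape
  else pvTrimTailA (pvTrimHeadA scale_shape)

-- ===== PORT B =====
-- while start < len(l) - 1 and l[start] == 1: start += 1
def pvFindStartB (l : List Int) (start : Nat) : Nat :=
  if start < l.length - 1 ∧ PySem.List.pyGet? l (start : Int) = some 1 then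
    pvFindStartB l (start + 1)
  else start
termination_by l.length - start
decreasing_by rename_i h; omega

-- while end > start + 1 and l[end - 1] == 1: end -= 1
def pvFindEndB (l : List Int) (start : Nat) (e : Nat) : Nat :=
  if start + 1 < e ∧ PySem.List.pyGet? l ((e : Int) - 1) = some 1 then
    pvFindEndB l start (e - 1)
  else e
termination_by e
decreasing_by rename_i h; omega

def trim_one_alt (scale_shape : List Int) : List Int :=
  if scale_shape.length ≤ 1 then scale_shape
  else
    let s := pvFindStartB scale_shape 0
    let e := pvFindEndB scale_shape s scale_shape.length
    PySem.List.slice scale_shape (some (s : Int)) (some (e : Int))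

-- ===== PRECONDITION & SPEC =====
def Spec_trim_one (scale_shape : List Int) (out : List Int) : Prop := out = trim_one_alt scale_shape
instance (scale_shape : List Int) (out : List Int) : Decidable (Spec_trim_one scale_shape out) := by unfold Spec_trim_one; infer_instance

-- ===== CLAIM (what is proved, stated in full; the proofs are below) =====
def Claim_equal_trim_one : Prop := ∀ (scale_shape : List Int), Dom_trim_one scale_shape → Spec_trim_one scale_shape (trim_one scale_shape)

-- ===== LEMMAS AND PROOFS =====

-- the start-index loop never leaves the list
theorem pvFindStartB_lt (l : List Int) (s : Nat) (hs : s < l.length) :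
    pvFindStartB l s < l.length := by
  rw [pvFindStartB]
  split
  · next h => exact pvFindStartB_lt l (s + 1) (by omega)
  · exact hs
termination_by l.length - s

-- A's head loop, started on the suffix l.drop s, is B's start-index loop
theorem pvTrimHeadA_drop (l : List Int) (s : Nat) (hs : s < l.length) :
    pvTrimHeadA (l.drop s) = l.drop (pvFindStartB l s) := by
  rw [pvTrimHeadA, pvFindStartB]
  have hlen : (l.drop s).length = l.length - s := by simp
  have hget : PySem.List.pyGet? (l.drop s) 0 = l[s]? := by
    simp [pysem, List.getElem?_drop]
  have hget' : PySem.List.pyGet? l (s : Int) = l[s]? := by simp [pysem]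
  by_cases hc : s < l.length - 1 ∧ PySem.List.pyGet? l (s : Int) = some 1
  · rw [if_pos hc, if_pos ⟨by omega, by rw [hget, ← hget']; exact hc.2⟩]
    rw [List.tail_drop]
    exact pvTrimHeadA_drop l (s + 1) (by omega)
  · rw [if_neg hc, if_neg (by
      intro h
      obtain ⟨h1, h2⟩ := h
      rw [hget, ← hget'] at h2
      exact hc ⟨by omega, h2⟩)]
termination_by l.length - s

-- A's tail loop, started on (l.drop s).take (e - s), is B's end-index loop
theorem pvTrimTailA_take (l : List Int) (s e : Nat) (hse : s < e) (he : e ≤ l.length) :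
    pvTrimTailA ((l.drop s).take (e - s)) = (l.drop s).take (pvFindEndB l s e - s) := by
  rw [pvTrimTailA, pvFindEndB]
  set t := (l.drop s).take (e - s) with ht
  have hlen : t.length = e - s := by rw [ht]; simp; omega
  have hgetlast : t.getLast? = l[e - 1]? := by
    rw [List.getLast?_eq_getElem?, hlen, ht, List.getElem?_take_of_lt (by omega),
        List.getElem?_drop]
    congr 1; omega
  have hgetneg : PySem.List.pyGet? t (-1) = t.getLast? := by simp [pysem]
  have hget' : PySem.List.pyGet? l ((e : Int) - 1) = l[e - 1]? := by
    have hcast : ((e : Int) - 1) = ((e - 1 : Nat) : Int) := by omega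
    rw [hcast]; simp [pysem]
  by_cases hc : s + 1 < e ∧ PySem.List.pyGet? l ((e : Int) - 1) = some 1
  · rw [if_pos hc, if_pos ⟨by omega, by rw [hgetneg, hgetlast, ← hget']; exact hc.2⟩]
    have hdl : t.dropLast = (l.drop s).take (e - 1 - s) := by
      rw [ht, List.dropLast_eq_take, List.take_take]
      congr 1
      simp
      omega
    rw [hdl]
    exact pvTrimTailA_take l s (e - 1) (by omega) (by omega)
  · rw [if_neg hc, if_neg (by
      intro h
      obtain ⟨h1, h2⟩ := h
      rw [hgetneg, hgetlast, ← hget'] at h2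
      exact hc ⟨by omega, h2⟩)]
termination_by e

-- ===== VERDICT (by name: the statement is the Claim_ definition above) =====
theorem trim_one_spec : Claim_equal_trim_one := by
  intro l _
  unfold Spec_trim_one trim_one trim_one_alt
  by_cases hlen : l.length ≤ 1
  · simp [hlen]
  · simp only [if_neg hlen]
    show pvTrimTailA (pvTrimHeadA l) =
      PySem.List.slice l (some ((pvFindStartB l 0 : Nat) : Int))
        (some ((pvFindEndB l (pvFindStartB l 0) l.length : Nat) : Int))
    set s := pvFindStartB l 0 with hs
    set e := pvFindEndB l s l.length with he
    have hslt : s < l.length := pvFindStartB_lt l 0 (by omega)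
    have hhead : pvTrimHeadA l = l.drop s := by
      have h := pvTrimHeadA_drop l 0 (by omega)
      simpa using h
    have htail := pvTrimTailA_take l s l.length hslt le_rfl
    have hfull : (l.drop s).take (l.length - s) = l.drop s := by
      apply List.take_of_length_le; simp
    rw [hfull] at htail
    rw [hhead, htail, PySem.List.slice_natCast]
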